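-- pv_equiv track=rewrite | github.com/osiris-dnalang/osiris-cli | osiris-unified-substrate/ultra_agent/reasoner.py | _map_requirements
-- ===== SOURCE A (Python) =====
-- from typing import Any, Dict, List
--
-- def _map_requirements(task: str) -> List[str]:
--     reqs = ["correctness"]
--     lowered = task.lower()
--     if any(w in lowered for w in ["fast", "efficient", "optimize"]):
--         reqs.append("performance")
--     if any(w in lowered for w in ["readable", "clean", "maintainable"]):
--         reqs.append("code quality")
--     if any(w in lowered for w in ["test", "verify", "validate"]):
--         reqs.append("verifiability")
--     if any(w in lowered for w in ["explain", "document", "describe"]):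
--         reqs.append("clarity")
--     if any(w in lowered for w in ["secure", "safe"]):
--         reqs.append("security")
--     return reqs
-- ===== SOURCE B (Python) =====
-- KEYWORDS = {
--     "fast": "performance", "efficient": "performance", "optimize": "performance",
--     "readable": "code quality", "clean": "code quality", "maintainable": "code quality",
--     "test": "verifiability", "verify": "verifiability", "validate": "verifiability",
--     "explain": "clarity", "document": "clarity", "describe": "clarity",
--     "secure": "security", "safe": "security",
-- }
-- ORDER = ["performance", "code quality", "verifiability", "clarity", "security"]
--
-- def _map_requirements(task: str):
--     lowered = task.lower()
--     found = set()
--     for i in range(len(lowered)):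
--         for kw, label in KEYWORDS.items():
--             if label not in found and lowered.startswith(kw, i):
--                 found.add(label)
--     return ["correctness"] + [lab for lab in ORDER if lab in found]
-- ===== Notes on version B (the rewrite author's own statement) =====
-- stated objective: alternative
-- what changed: Replaces per-keyword substring tests ('w in lowered' five times) with a single left-to-right scan over the text positions that matches all keywords of a keyword-to-label table via startswith into a found-set, then emits labels in canonical order.
import Mathlib
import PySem

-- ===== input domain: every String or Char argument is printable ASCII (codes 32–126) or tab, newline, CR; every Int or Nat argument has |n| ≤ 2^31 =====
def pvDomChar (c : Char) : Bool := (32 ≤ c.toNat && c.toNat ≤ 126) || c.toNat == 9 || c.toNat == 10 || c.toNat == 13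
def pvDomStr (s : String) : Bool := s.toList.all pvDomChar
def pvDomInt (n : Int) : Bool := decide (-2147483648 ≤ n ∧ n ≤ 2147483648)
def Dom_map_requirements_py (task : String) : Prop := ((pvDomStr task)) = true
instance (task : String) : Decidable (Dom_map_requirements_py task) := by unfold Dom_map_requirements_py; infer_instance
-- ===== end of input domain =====

-- B replaces A's five per-keyword substring tests with one left-to-right scan over
-- text positions matching a keyword→label table via startswith into a found-set;
-- same cost, a different (position-driven multi-pattern) algorithm.

-- ===== PORT A =====
def map_requirements_py (task : String) : List String :=
  let reqs := ["correctness"]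
  let lowered := PySem.Str.lower task
  let reqs := if (["fast", "efficient", "optimize"].any fun w => PySem.Str.isIn w lowered)
    then reqs ++ ["performance"] else reqs
  let reqs := if (["readable", "clean", "maintainable"].any fun w => PySem.Str.isIn w lowered)
    then reqs ++ ["code quality"] else reqs
  let reqs := if (["test", "verify", "validate"].any fun w => PySem.Str.isIn w lowered)
    then reqs ++ ["verifiability"] else reqs
  let reqs := if (["explain", "document", "describe"].any fun w => PySem.Str.isIn w lowered)
    then reqs ++ ["clarity"] else reqs
  let reqs := if (["secure", "safe"].any fun w => PySem.Str.isIn w lowered)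
    then reqs ++ ["security"] else reqs
  reqs

-- ===== PORT B =====
-- KEYWORDS dict (keyword → label), iterated in insertion order
def pvKeywords : List (String × String) :=
  [ ("fast", "performance"), ("efficient", "performance"), ("optimize", "performance"),
    ("readable", "code quality"), ("clean", "code quality"), ("maintainable", "code quality"),
    ("test", "verifiability"), ("verify", "verifiability"), ("validate", "verifiability"),
    ("explain", "clarity"), ("document", "clarity"), ("describe", "clarity"),
    ("secure", "security"), ("safe", "security") ]

def pvOrder : List String :=
  ["performance", "code quality", "verifiability", "clarity", "security"]

-- inner loop body: one position i; lowered.startswith(kw, i) is exact as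
-- Chars.startswith (lowered.drop i) kw for 0 ≤ i < len(lowered)
def pvScanStep (lowered : List Char) (acc : PySem.Set String) (i : Nat) : PySem.Set String :=
  pvKeywords.foldl (fun acc p =>
    if !(PySem.Set.contains acc p.2) && PySem.Chars.startswith (lowered.drop i) p.1.toList
    then PySem.Set.add acc p.2 else acc) acc

def pvFound (lowered : List Char) : PySem.Set String :=
  (List.range lowered.length).foldl (pvScanStep lowered) PySem.Set.empty

def map_requirements_py_alt (task : String) : List String :=
  let lowered := (PySem.Str.lower task).toList
  let found := pvFound lowered
  "correctness" :: pvOrder.filter (fun lab => PySem.Set.contains found lab)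

-- ===== PRECONDITION & SPEC =====
def Spec_map_requirements_py (task : String) (out : List String) : Prop := out = map_requirements_py_alt task
instance (task : String) (out : List String) : Decidable (Spec_map_requirements_py task out) := by unfold Spec_map_requirements_py; infer_instance

-- ===== CLAIM =====
def Claim_equal_map_requirements_py : Prop := ∀ (task : String), Dom_map_requirements_py task → Spec_map_requirements_py task (map_requirements_py task)

-- ===== LEMMAS AND PROOFS =====

-- membership after the inner (keyword-table) loop
theorem mem_scanStep (lowered : List Char) (i : Nat) :
    ∀ (rs : List (String × String)) (acc : PySem.Set String) (L : String),
      L ∈ rs.foldl (fun acc p =>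
        if !(PySem.Set.contains acc p.2) && PySem.Chars.startswith (lowered.drop i) p.1.toList
        then PySem.Set.add acc p.2 else acc) acc ↔
      L ∈ acc ∨ ∃ p ∈ rs, p.2 = L ∧ PySem.Chars.startswith (lowered.drop i) p.1.toList = true := by
  intro rs
  induction rs with
  | nil => simp
  | cons p rs ih =>
    intro acc L
    simp only [List.foldl_cons, ih, List.mem_cons]
    cases hc : PySem.Set.contains acc p.2 with
    | true =>
      rw [if_neg (by simp)]
      have hmem : p.2 ∈ acc := (PySem.Set.contains_iff _ _).mp hc
      constructor
      · rintro (h | ⟨q, hq, h2, h3⟩)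
        · exact Or.inl h
        · exact Or.inr ⟨q, Or.inr hq, h2, h3⟩
      · rintro (h | ⟨q, (rfl | hq), h2, h3⟩)
        · exact Or.inl h
        · exact Or.inl (h2 ▸ hmem)
        · exact Or.inr ⟨q, hq, h2, h3⟩
    | false =>
      cases hs : PySem.Chars.startswith (lowered.drop i) p.1.toList with
      | true =>
        rw [if_pos (by simp), PySem.Set.mem_add]
        constructor
        · rintro ((h | rfl) | ⟨q, hq, h2, h3⟩)
          · exact Or.inl h
          · exact Or.inr ⟨p, Or.inl rfl, rfl, hs⟩
          · exact Or.inr ⟨q, Or.inr hq, h2, h3⟩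
        · rintro (h | ⟨q, (rfl | hq), h2, h3⟩)
          · exact Or.inl (Or.inl h)
          · exact Or.inl (Or.inr h2.symm)
          · exact Or.inr ⟨q, hq, h2, h3⟩
      | false =>
        rw [if_neg (by simp)]
        constructor
        · rintro (h | ⟨q, hq, h2, h3⟩)
          · exact Or.inl h
          · exact Or.inr ⟨q, Or.inr hq, h2, h3⟩
        · rintro (h | ⟨q, (rfl | hq), h2, h3⟩)
          · exact Or.inl h
          · exact absurd h3 (by rw [hs]; simp)
          · exact Or.inr ⟨q, hq, h2, h3⟩

-- membership after the outer (position) loop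
theorem mem_scan (lowered : List Char) :
    ∀ (idxs : List Nat) (acc : PySem.Set String) (L : String),
      L ∈ idxs.foldl (pvScanStep lowered) acc ↔
      L ∈ acc ∨ ∃ i ∈ idxs, ∃ p ∈ pvKeywords, p.2 = L ∧
        PySem.Chars.startswith (lowered.drop i) p.1.toList = true := by
  intro idxs
  induction idxs with
  | nil => simp
  | cons i idxs ih =>
    intro acc L
    simp only [List.foldl_cons, ih, List.mem_cons]
    rw [pvScanStep, mem_scanStep]
    constructor
    · rintro ((h | ⟨p, hp, h2, h3⟩) | ⟨j, hj, p, hp, h2, h3⟩)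
      · exact Or.inl h
      · exact Or.inr ⟨i, Or.inl rfl, p, hp, h2, h3⟩
      · exact Or.inr ⟨j, Or.inr hj, p, hp, h2, h3⟩
    · rintro (h | ⟨j, (rfl | hj), p, hp, h2, h3⟩)
      · exact Or.inl (Or.inl h)
      · exact Or.inl (Or.inr ⟨p, hp, h2, h3⟩)
      · exact Or.inr ⟨j, hj, p, hp, h2, h3⟩

-- a nonempty keyword matches at some scanned position iff it is a substring
theorem exists_pos_iff_isIn (s : List Char) (kw : List Char) (hk : kw ≠ []) :
    (∃ i ∈ List.range s.length, PySem.Chars.startswith (s.drop i) kw = true) ↔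
    PySem.Chars.isIn kw s = true := by
  rw [← PySem.Chars.exists_prefix_drop_iff_isIn]
  constructor
  · rintro ⟨i, _, h⟩
    exact ⟨i, (PySem.Chars.startswith_iff _ _).mp h⟩
  · rintro ⟨j, h⟩
    by_cases hj : j < s.length
    · exact ⟨j, List.mem_range.mpr hj, (PySem.Chars.startswith_iff _ _).mpr h⟩
    · exfalso
      have : s.drop j = [] := List.drop_eq_nil_of_le (le_of_not_gt hj)
      rw [this] at h
      exact hk (List.prefix_nil.mp h)

-- final found-set membership
theorem mem_found (s : List Char) (L : String) :
    L ∈ pvFound s ↔ ∃ p ∈ pvKeywords, p.2 = L ∧ PySem.Chars.isIn p.1.toList s = true := by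
  rw [pvFound, mem_scan]
  constructor
  · rintro (h | ⟨i, hi, p, hp, h2, h3⟩)
    · exact absurd h (by simp [PySem.Set.empty])
    · have hk : p.1.toList ≠ [] := by
        fin_cases hp <;> simp
      exact ⟨p, hp, h2, (exists_pos_iff_isIn s p.1.toList hk).mp ⟨i, hi, h3⟩⟩
  · rintro ⟨p, hp, h2, h3⟩
    have hk : p.1.toList ≠ [] := by fin_cases hp <;> simp
    obtain ⟨i, hi, hsw⟩ := (exists_pos_iff_isIn s p.1.toList hk).mpr h3
    exact Or.inr ⟨i, hi, p, hp, h2, hsw⟩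

theorem contains_found (s : List Char) (L : String) :
    PySem.Set.contains (pvFound s) L =
      (pvKeywords.any fun p => decide (p.2 = L) && PySem.Chars.isIn p.1.toList s) := by
  have h1 : PySem.Set.contains (pvFound s) L = true ↔
      (pvKeywords.any fun p => decide (p.2 = L) && PySem.Chars.isIn p.1.toList s) = true := by
    rw [PySem.Set.contains_iff, mem_found]
    simp only [List.any_eq_true, Bool.and_eq_true, decide_eq_true_eq]
  exact Bool.coe_iff_coe.mp h1

-- ===== VERDICT =====
set_option maxHeartbeats 1000000 in
theorem map_requirements_py_spec : Claim_equal_map_requirements_py := by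
  intro task _
  unfold Spec_map_requirements_py map_requirements_py map_requirements_py_alt
  simp only [pvOrder, List.filter_cons, List.filter_nil, contains_found, pvKeywords,
    List.any_cons, List.any_nil, PySem.Str.isIn_eq, Bool.or_false]
  cases h1 : (PySem.Chars.isIn "fast".toList (PySem.Str.lower task).toList ||
      (PySem.Chars.isIn "efficient".toList (PySem.Str.lower task).toList ||
       PySem.Chars.isIn "optimize".toList (PySem.Str.lower task).toList)) <;>
  cases h2 : (PySem.Chars.isIn "readable".toList (PySem.Str.lower task).toList ||
      (PySem.Chars.isIn "clean".toList (PySem.Str.lower task).toList ||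
       PySem.Chars.isIn "maintainable".toList (PySem.Str.lower task).toList)) <;>
  cases h3 : (PySem.Chars.isIn "test".toList (PySem.Str.lower task).toList ||
      (PySem.Chars.isIn "verify".toList (PySem.Str.lower task).toList ||
       PySem.Chars.isIn "validate".toList (PySem.Str.lower task).toList)) <;>
  cases h4 : (PySem.Chars.isIn "explain".toList (PySem.Str.lower task).toList ||
      (PySem.Chars.isIn "document".toList (PySem.Str.lower task).toList ||
       PySem.Chars.isIn "describe".toList (PySem.Str.lower task).toList)) <;>
  cases h5 : (PySem.Chars.isIn "secure".toList (PySem.Str.lower task).toList ||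
       PySem.Chars.isIn "safe".toList (PySem.Str.lower task).toList) <;>
  simp_all
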